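-- pv_equiv track=rewrite | github.com/ShawnButtrick/python_mbta | mbta.py | build_route_intersections
-- ===== SOURCE A (Python) =====
-- def build_route_intersections(set_of_stops, routeIds_to_stopIds):
--     '''
--     This is a crude inverted dictionary.
--     Also I should probably remove all the key+value where the value is list of length One.
--     Returns a dictionary where a keys are stopIds and the values are lists-of-routeIds
--     '''
--     stopIds_to_routeIds = {}
--     for temp_stop in set_of_stops:
--         stopIds_to_routeIds[temp_stop] = []
--         for route,stops in routeIds_to_stopIds.items():
--             if temp_stop in stops:
--                 stopIds_to_routeIds[temp_stop].append(route)
--     return stopIds_to_routeIds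
-- ===== SOURCE B (Python) =====
-- def build_route_intersections(set_of_stops, routeIds_to_stopIds):
--     """Two-stage inversion: flatten the route->stops map into a flat list of
--     (stop, route) hits in route-major order, then group the hits per stop in
--     one pass over a pre-initialized dict; no per-stop scan of every route."""
--     stop_keys = list(dict.fromkeys(set_of_stops))
--     wanted = set(stop_keys)
--     hits = [(stop, route)
--             for route, route_stops in routeIds_to_stopIds.items()
--             for stop in dict.fromkeys(route_stops)
--             if stop in wanted]
--     groups = {stop: [] for stop in stop_keys}
--     for stop, route in hits:
--         groups[stop].append(route)
--     return groups
-- ===== Notes on version B (the rewrite author's own statement) =====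
-- stated objective: faster
-- what changed: Replaces A's per-stop scan of every route's stop list with a two-stage inversion: flatten routeIds_to_stopIds into a flat (stop, route) hit list (deduplicated per route, restricted to the wanted stops), then group the hits per stop in a single pass over a pre-initialized dict.
import Mathlib
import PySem

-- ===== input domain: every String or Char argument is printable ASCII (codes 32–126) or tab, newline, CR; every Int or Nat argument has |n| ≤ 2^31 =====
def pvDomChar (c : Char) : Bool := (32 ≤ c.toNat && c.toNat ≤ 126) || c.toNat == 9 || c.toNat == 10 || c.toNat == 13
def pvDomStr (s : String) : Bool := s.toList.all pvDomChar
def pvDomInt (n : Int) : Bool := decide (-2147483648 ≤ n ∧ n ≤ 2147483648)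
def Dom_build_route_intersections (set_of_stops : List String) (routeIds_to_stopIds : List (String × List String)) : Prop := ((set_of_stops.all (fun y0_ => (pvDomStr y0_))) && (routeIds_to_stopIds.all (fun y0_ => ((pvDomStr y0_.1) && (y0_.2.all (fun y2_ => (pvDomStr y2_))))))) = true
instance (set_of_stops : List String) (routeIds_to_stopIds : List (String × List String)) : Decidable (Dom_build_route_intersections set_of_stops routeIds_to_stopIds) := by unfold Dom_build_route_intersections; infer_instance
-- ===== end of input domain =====

-- B replaces A's per-stop scan of every route (gather) by a two-stage inversion: flatten the
-- route map into a flat (stop, route) hit list, then group it per stop in one pass; faster.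

-- ===== PORT A =====
-- A: for each stop, scan every route's stop list and append matching routes into a dict.
def build_route_intersections (set_of_stops : List String) (routeIds_to_stopIds : List (String × List String)) : List (String × List String) :=
  (set_of_stops.foldl
    (fun d temp_stop =>
      routeIds_to_stopIds.foldl
        (fun d p =>
          if p.2.contains temp_stop then
            d.modify temp_stop [] (fun l => l ++ [p.1])
          else d)
        (d.insert temp_stop ([] : List String)))
    PySem.Dict.empty).items

-- ===== PORT B =====
-- B: flatten route->stops into a flat (stop, route) hit list in route-major order,
-- then group the hits per stop in one pass over a pre-initialized dict.
def build_route_intersections_alt (set_of_stops : List String) (routeIds_to_stopIds : List (String × List String)) : List (String × List String) :=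
  let stop_keys := PySem.List.dedup set_of_stops
  let hits : List (String × String) :=
    routeIds_to_stopIds.flatMap (fun p =>
      ((PySem.List.dedup p.2).filter (fun stop => stop_keys.contains stop)).map
        (fun stop => (stop, p.1)))
  -- '{stop: [] for stop in stop_keys}' (stop_keys is duplicate-free)
  let groups : PySem.Dict String (List String) :=
    stop_keys.foldl (fun g stop => g.insert stop ([] : List String)) PySem.Dict.empty
  (hits.foldl (fun g h => g.modify h.1 [] (fun l => l ++ [h.2])) groups).items

-- ===== PRECONDITION & SPEC =====

def Spec_build_route_intersections (set_of_stops : List String) (routeIds_to_stopIds : List (String × List String)) (out : List (String × List String)) : Prop := out = build_route_intersections_alt set_of_stops routeIds_to_stopIds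
instance (set_of_stops : List String) (routeIds_to_stopIds : List (String × List String)) (out : List (String × List String)) : Decidable (Spec_build_route_intersections set_of_stops routeIds_to_stopIds out) := by unfold Spec_build_route_intersections; infer_instance

-- ===== CLAIM (what is proved, stated in full; the proofs are below) =====
def Claim_equal_build_route_intersections : Prop := ∀ (set_of_stops : List String) (routeIds_to_stopIds : List (String × List String)), Dom_build_route_intersections set_of_stops routeIds_to_stopIds → Spec_build_route_intersections set_of_stops routeIds_to_stopIds (build_route_intersections set_of_stops routeIds_to_stopIds)

-- ===== LEMMAS AND PROOFS =====

-- the routes whose stop list contains s, in input order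
def routesFor (r2s : List (String × List String)) (s : String) : List String :=
  (r2s.filter (fun p => p.2.contains s)).map Prod.fst

theorem routesFor_cons (p : String × List String) (r2s : List (String × List String)) (s : String) :
    routesFor (p :: r2s) s = (if p.2.contains s then [p.1] else []) ++ routesFor r2s s := by
  simp only [routesFor, List.filter]
  split <;> rename_i h <;> simp_all

-- ---- A's inner loop (over the routes, fixed stop s) ----

theorem innerA_getD (r2s : List (String × List String)) (s : String)
    (d : PySem.Dict String (List String)) (k : String) :
    (r2s.foldl (fun d p => if p.2.contains s then d.modify s [] (fun l => l ++ [p.1]) else d) d).getD k []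
    = if k = s then d.getD s [] ++ routesFor r2s s else d.getD k [] := by
  induction r2s generalizing d with
  | nil =>
    rw [List.foldl_nil]
    by_cases hk : k = s <;> simp [hk, routesFor]
  | cons p rest ih =>
    simp only [List.foldl_cons]
    rw [ih, routesFor_cons]
    cases hc : p.2.contains s with
    | true =>
      simp only [if_true, PySem.Dict.getD_modify]
      by_cases hk : k = s <;> simp [hk]
    | false =>
      simp only [Bool.false_eq_true, if_false]
      by_cases hk : k = s <;> simp [hk]

theorem innerA_keys (r2s : List (String × List String)) (s : String)
    (d : PySem.Dict String (List String)) (h : d.contains s = true) :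
    (r2s.foldl (fun d p => if p.2.contains s then d.modify s [] (fun l => l ++ [p.1]) else d) d).keys = d.keys := by
  induction r2s generalizing d with
  | nil => rfl
  | cons p rest ih =>
    simp only [List.foldl_cons]
    cases hc : p.2.contains s with
    | true =>
      simp only [if_true]
      rw [ih _ (by simp [PySem.Dict.contains_modify]),
          PySem.Dict.keys_modify, PySem.Dict.keys_insert_of_contains _ _ h]
    | false =>
      simp only [Bool.false_eq_true, if_false]
      exact ih _ h

-- ---- A's outer loop ----

theorem foldA_getD (set_of_stops : List String) (r2s : List (String × List String))
    (d : PySem.Dict String (List String)) (k : String) :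
    (set_of_stops.foldl (fun d temp_stop =>
        r2s.foldl (fun d p => if p.2.contains temp_stop then d.modify temp_stop [] (fun l => l ++ [p.1]) else d)
          (d.insert temp_stop ([] : List String))) d).getD k []
    = if k ∈ set_of_stops then routesFor r2s k else d.getD k [] := by
  induction set_of_stops generalizing d with
  | nil => simp
  | cons s rest ih =>
    simp only [List.foldl_cons]
    rw [ih]
    have hstep : (r2s.foldl (fun d p => if p.2.contains s then d.modify s [] (fun l => l ++ [p.1]) else d)
        (d.insert s ([] : List String))).getD k []
        = if k = s then routesFor r2s s else d.getD k [] := by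
      rw [innerA_getD]
      by_cases hk : k = s <;> simp [hk, PySem.Dict.getD_insert]
    by_cases hk : k ∈ rest
    · simp [hk]
    · rw [if_neg hk, hstep]
      by_cases hks : k = s
      · simp [hks]
      · simp [hks, List.mem_cons, hk]

theorem keys_insert_eq_add (d : PySem.Dict String (List String)) (s : String) (v : List String) :
    (d.insert s v).keys = PySem.Set.add d.keys s := by
  by_cases h : d.contains s = true
  · rw [PySem.Dict.keys_insert_of_contains d v h]
    have hm : s ∈ d.keys := (PySem.Dict.contains_iff_mem_keys d s).1 h
    simp [PySem.Set.add, hm]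
  · rw [PySem.Dict.keys_insert_of_not_contains d v (by simpa using h)]
    have hm : s ∉ d.keys := fun hx => h ((PySem.Dict.contains_iff_mem_keys d s).2 hx)
    simp [PySem.Set.add, hm]

theorem foldA_keys (set_of_stops : List String) (r2s : List (String × List String))
    (d : PySem.Dict String (List String)) :
    (set_of_stops.foldl (fun d temp_stop =>
        r2s.foldl (fun d p => if p.2.contains temp_stop then d.modify temp_stop [] (fun l => l ++ [p.1]) else d)
          (d.insert temp_stop ([] : List String))) d).keys
    = PySem.Set.update d.keys set_of_stops := by
  induction set_of_stops generalizing d with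
  | nil => rfl
  | cons s rest ih =>
    simp only [List.foldl_cons, PySem.Set.update]
    rw [ih, innerA_keys _ _ _ (by simp [PySem.Dict.contains_insert_self]), keys_insert_eq_add]
    rfl

-- ---- B: the hit list restricted to one stop is exactly routesFor ----

theorem filter_eq_singleton_of_nodup (l : List String) (h : l.Nodup) (k : String) :
    l.filter (fun x => x == k) = if k ∈ l then [k] else [] := by
  induction l with
  | nil => simp
  | cons a rest ih =>
    obtain ⟨ha, hrest⟩ := List.nodup_cons.1 h
    by_cases hk : a = k
    · subst hk
      simp [ih hrest, ha]
    · simp [hk, ih hrest, List.mem_cons, Ne.symm hk]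

theorem hits_filter (r2s : List (String × List String)) (sk : List String) (k : String)
    (hk : sk.contains k = true) :
    (((r2s.flatMap (fun p =>
        ((PySem.List.dedup p.2).filter (fun stop => sk.contains stop)).map
          (fun stop => (stop, p.1)))).filter (fun h => h.1 == k)).map (fun h => h.2))
    = routesFor r2s k := by
  have hkm : k ∈ sk := by rwa [List.contains_iff_mem] at hk
  induction r2s with
  | nil => simp [routesFor]
  | cons p rest ih =>
    rw [List.flatMap_cons, List.filter_append, List.map_append, ih, routesFor_cons]
    congr 1
    rw [List.filter_map, List.map_map]
    have : ((PySem.List.dedup p.2).filter (fun stop => sk.contains stop)).filter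
        ((fun (h : String × String) => h.1 == k) ∘ (fun stop => (stop, p.1)))
        = ((PySem.List.dedup p.2).filter (fun stop => sk.contains stop)).filter (fun x => x == k) := by
      simp [Function.comp]
    rw [this, List.filter_filter,
        show (fun x => x == k && sk.contains x) = fun x => x == k from
          funext (fun x => by by_cases hx : x = k <;> simp [hx, hkm]),
        filter_eq_singleton_of_nodup _ (PySem.List.nodup_dedup p.2) k]
    by_cases hm : k ∈ PySem.List.dedup p.2
    · rw [if_pos hm]
      have hc : p.2.contains k = true := by
        rw [List.contains_iff_mem]
        exact (PySem.List.mem_dedup p.2 k).1 hm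
      simp [List.contains_iff_mem.mp hc]
    · rw [if_neg hm]
      have hc : p.2.contains k = false := by
        rw [Bool.eq_false_iff]
        intro hcc
        exact hm ((PySem.List.mem_dedup p.2 k).2 (by rwa [List.contains_iff_mem] at hcc))
      have hnm : k ∉ p.2 := fun hcc => hm ((PySem.List.mem_dedup p.2 k).2 hcc)
      simp [hnm]

-- ---- B's grouping pass ----

theorem groupB_getD (hits : List (String × String))
    (d : PySem.Dict String (List String)) (k : String) :
    (hits.foldl (fun g h => g.modify h.1 [] (fun l => l ++ [h.2])) d).getD k []
    = d.getD k [] ++ (hits.filter (fun h => h.1 == k)).map (fun h => h.2) := by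
  induction hits generalizing d with
  | nil => simp
  | cons h rest ih =>
    simp only [List.foldl_cons, List.filter_cons]
    rw [ih]
    by_cases hk : h.1 = k
    · simp [hk]
    · have : (h.1 == k) = false := by simp [hk]
      simp [this, PySem.Dict.getD_modify, Ne.symm hk]

theorem groupB_keys (hits : List (String × String))
    (d : PySem.Dict String (List String)) (hin : ∀ h ∈ hits, d.contains h.1 = true) :
    (hits.foldl (fun g h => g.modify h.1 [] (fun l => l ++ [h.2])) d).keys = d.keys := by
  induction hits generalizing d with
  | nil => rfl
  | cons h rest ih =>
    simp only [List.foldl_cons]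
    have hc : d.contains h.1 = true := hin h (List.mem_cons_self ..)
    rw [ih _ (fun x hx => by
        simp only [PySem.Dict.contains_modify]
        rw [hin x (List.mem_cons_of_mem _ hx)]
        simp),
      PySem.Dict.keys_modify, PySem.Dict.keys_insert_of_contains _ _ hc]

-- ---- B's initial dict ----

theorem init_getD (sk : List String) (d : PySem.Dict String (List String)) (k : String)
    (h : d.getD k [] = []) :
    (sk.foldl (fun g stop => g.insert stop ([] : List String)) d).getD k [] = [] := by
  induction sk generalizing d with
  | nil => simpa using h
  | cons s rest ih =>
    simp only [List.foldl_cons]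
    refine ih _ ?_
    rw [PySem.Dict.getD_insert]
    by_cases hk : k = s <;> simp [hk, h]

theorem init_keys (sk : List String) :
    (sk.foldl (fun g stop => g.insert stop ([] : List String))
      (PySem.Dict.empty : PySem.Dict String (List String))).keys = PySem.Set.ofList sk := by
  rw [show (fun (g : PySem.Dict String (List String)) (stop : String) => g.insert stop ([] : List String))
      = fun g stop => g.insert stop ((fun (_ : PySem.Dict String (List String)) (_ : String) => ([] : List String)) g stop) from rfl,
    PySem.Dict.keys_foldl_insert, PySem.Dict.keys_empty, PySem.Set.update_nil_left]

-- ===== VERDICT (by name: the statement is the Claim_ definition above) =====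
theorem build_route_intersections_spec : Claim_equal_build_route_intersections := by
  intro sos r2s _
  unfold Spec_build_route_intersections build_route_intersections build_route_intersections_alt
  set sk := PySem.List.dedup sos with hsk
  set hits := r2s.flatMap (fun p =>
      ((PySem.List.dedup p.2).filter (fun stop => sk.contains stop)).map
        (fun stop => (stop, p.1))) with hhits
  set init := sk.foldl (fun g stop => g.insert stop ([] : List String))
      (PySem.Dict.empty : PySem.Dict String (List String)) with hinit
  set dA := sos.foldl (fun d temp_stop =>
      r2s.foldl (fun d p => if p.2.contains temp_stop then d.modify temp_stop [] (fun l => l ++ [p.1]) else d)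
        (d.insert temp_stop ([] : List String))) PySem.Dict.empty with hdA
  set dB := hits.foldl (fun g h => g.modify h.1 [] (fun l => l ++ [h.2])) init with hdB
  have hskof : sk = PySem.Set.ofList sos := by rw [hsk, PySem.List.dedup_eq_ofList]
  have hkA : dA.keys = PySem.Set.ofList sos := by
    rw [hdA, foldA_keys, PySem.Dict.keys_empty, PySem.Set.update_nil_left]
  have hkI : init.keys = PySem.Set.ofList sk := init_keys sk
  have hskk : PySem.Set.ofList sk = sk := by
    rw [hskof]; exact PySem.Set.ofList_eq_self_of_nodup _ (by rw [← hskof]; exact PySem.List.nodup_dedup sos)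
  have hinhits : ∀ h ∈ hits, init.contains h.1 = true := by
    intro h hm
    rw [hhits] at hm
    obtain ⟨p, _, hm2⟩ := List.mem_flatMap.1 hm
    obtain ⟨stop, hstop, rfl⟩ := List.mem_map.1 hm2
    have := (List.mem_filter.1 hstop).2
    rw [PySem.Dict.contains_iff_mem_keys, hkI, hskk]
    simpa [List.contains_iff_mem] using this
  have hkB : dB.keys = PySem.Set.ofList sos := by
    rw [hdB, groupB_keys _ _ hinhits, hkI, hskk, hskof]
  have hnA : dA.keys.Nodup := by rw [hkA]; exact PySem.Set.nodup_ofList sos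
  have hnB : dB.keys.Nodup := by rw [hkB]; exact PySem.Set.nodup_ofList sos
  rw [PySem.Dict.items_eq_map_keys dA hnA ([] : List String),
      PySem.Dict.items_eq_map_keys dB hnB ([] : List String), hkA, hkB]
  refine List.map_congr_left ?_
  intro k hk
  have hks : k ∈ sos := (PySem.Set.mem_ofList sos k).1 hk
  have hkc : sk.contains k = true := by
    rw [List.contains_iff_mem, hskof]
    exact (PySem.Set.mem_ofList sos k).2 hks
  have hA : dA.getD k [] = routesFor r2s k := by
    rw [hdA, foldA_getD]; simp [hks]
  have hB : dB.getD k [] = routesFor r2s k := by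
    rw [hdB, groupB_getD, init_getD sk _ _ (PySem.Dict.getD_empty k []), hhits,
        hits_filter r2s sk k hkc]
    simp
  rw [hA, hB]
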